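-- pv_equiv track=rewrite | github.com/gauravopentech/adventofcode | day3/solution.py | extract_part_star
-- ===== SOURCE A (Python) =====
-- def extract_part_star(line):
--     parts = []
--     star = set()
--     i = 0
--     len_line = len(line)
--     while i < len_line:
--         if line[i].isdigit():
--             start = i
--             while i < len_line and line[i].isdigit():
--                 i += 1
--             end = i
--             parts.append([int(line[start:end]), (start, end)])
--         else:
--             if line[i] == "*":
--                 star.add(i)
--
--             i += 1
--
--     return parts, star
-- ===== SOURCE B (Python) =====
-- def extract_part_star(line):
--     isdig = [ch.isdigit() for ch in line]
--     starts = [i for i, (prev, cur) in enumerate(zip([False] + isdig, isdig)) if cur and not prev]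
--     ends = [i + 1 for i, (cur, nxt) in enumerate(zip(isdig, isdig[1:] + [False])) if cur and not nxt]
--     parts = [[int(line[s:e]), (s, e)] for s, e in zip(starts, ends)]
--     star = {i for i, ch in enumerate(line) if ch == "*"}
--     return parts, star
-- ===== Notes on version B (the rewrite author's own statement) =====
-- stated objective: alternative
-- what changed: Replaced A's stateful index walk that extracts digit runs one at a time by staged comprehensions: a digit mask, run boundaries detected by comparing each position with its shifted neighbour (zip of the mask with itself offset by one), parts built by zipping the start and end boundary lists, and stars collected by an independent enumerate filter.
import Mathlib
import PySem

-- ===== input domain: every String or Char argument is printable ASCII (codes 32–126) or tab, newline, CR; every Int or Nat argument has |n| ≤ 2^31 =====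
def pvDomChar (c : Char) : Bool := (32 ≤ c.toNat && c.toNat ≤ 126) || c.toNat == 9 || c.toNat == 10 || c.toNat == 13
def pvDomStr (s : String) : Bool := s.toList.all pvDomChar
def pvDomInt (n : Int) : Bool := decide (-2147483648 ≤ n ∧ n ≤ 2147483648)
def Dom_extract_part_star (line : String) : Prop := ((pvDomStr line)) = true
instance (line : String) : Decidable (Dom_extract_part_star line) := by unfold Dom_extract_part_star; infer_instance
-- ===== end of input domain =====

-- B replaces A's stateful index walk by staged passes: a digit mask, run boundaries by
-- comparing the mask with its shifted copy, parts from zipped boundary lists, stars from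
-- an independent filter (objective: alternative).


-- ===== PORT A =====
-- Outer while over the remaining characters with absolute index i; the inner
-- digit-consuming while is the takeWhile/dropWhile split of the remainder.
-- int(line[start:end]) is PySem.Int.ofChars? on the digit run; the run is nonempty
-- digits, so `.getD 0` is never the fallback on any input.
def extract_part_star_goA (cs : List Char) (i : Nat) (parts : List (Int × (Int × Int)))
    (star : PySem.Set Int) : (List (Int × (Int × Int))) × List Int :=
  match cs with
  | [] => (parts, star)
  | c :: rest =>
    if PySem.Chars.isdigit c then
      let run := (c :: rest).takeWhile PySem.Chars.isdigit
      extract_part_star_goA ((c :: rest).dropWhile PySem.Chars.isdigit) (i + run.length)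
        (parts ++ [(((PySem.Int.ofChars? run).getD 0),
          ((i : Int), ((i + run.length : Nat) : Int)))]) star
    else
      extract_part_star_goA rest (i + 1) parts
        (if c = '*' then PySem.Set.add star (i : Int) else star)
termination_by cs.length
decreasing_by
  · simp only [List.dropWhile_cons, *, if_pos]
    exact Nat.lt_succ_of_le (List.length_dropWhile_le _ _)
  · simp

def extract_part_star (line : String) : (List (Int × (Int × Int))) × List Int :=
  extract_part_star_goA line.toList 0 [] PySem.Set.empty

-- ===== PORT B =====
-- Staged comprehensions, step for step from Source B: the digit mask `isdig`; `starts` from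
-- enumerate(zip([False]+isdig, isdig)); `ends` from enumerate(zip(isdig, isdig[1:]+[False]))
-- (isdig[1:] is drop 1, exact for a plain list); `parts` maps over zip(starts, ends) slicing
-- the line; `star` is the set of indices whose character is '*'.
def extract_part_star_alt (line : String) : (List (Int × (Int × Int))) × List Int :=
  let cs := line.toList
  let isdig := cs.map PySem.Chars.isdigit
  let starts : List Int :=
    (PySem.List.enumerate (List.zip (false :: isdig) isdig) 0).filterMap
      (fun p => if p.2.2 && !p.2.1 then some p.1 else none)
  let ends : List Int :=
    (PySem.List.enumerate (List.zip isdig (isdig.drop 1 ++ [false])) 0).filterMap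
      (fun p => if p.2.1 && !p.2.2 then some (p.1 + 1) else none)
  let parts := (starts.zip ends).map (fun se =>
    (((PySem.Int.ofChars? (PySem.List.slice cs (some se.1) (some se.2))).getD 0),
      (se.1, se.2)))
  let star := PySem.Set.ofList
    ((PySem.List.enumerate cs 0).filterMap (fun p => if p.2 = '*' then some p.1 else none))
  (parts, star)

-- ===== PRECONDITION & SPEC =====
def Spec_extract_part_star (line : String) (out : (List (Int × (Int × Int))) × List Int) : Prop := out = extract_part_star_alt line
instance (line : String) (out : (List (Int × (Int × Int))) × List Int) : Decidable (Spec_extract_part_star line out) := by unfold Spec_extract_part_star; infer_instance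

-- ===== CLAIM (what is proved, stated in full; the proofs are below) =====
def Claim_equal_extract_part_star : Prop := ∀ (line : String), Dom_extract_part_star line → Spec_extract_part_star line (extract_part_star line)

-- ===== LEMMAS AND PROOFS =====

-- proof-side recursive characterisations of B's staged comprehensions
def pvHeadDig : List Char → Bool
  | [] => false
  | c :: _ => PySem.Chars.isdigit c

def pvS (k : Int) (p : Bool) : List Char → List Int
  | [] => []
  | c :: cs => (if PySem.Chars.isdigit c && !p then [k] else []) ++ pvS (k + 1) (PySem.Chars.isdigit c) cs

def pvE (k : Int) : List Char → List Int
  | [] => []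
  | c :: cs => (if PySem.Chars.isdigit c && !pvHeadDig cs then [k + 1] else []) ++ pvE (k + 1) cs

def pvSI (k : Int) : List Char → List Int
  | [] => []
  | c :: cs => (if c = '*' then [k] else []) ++ pvSI (k + 1) cs

lemma starts_eq (cs : List Char) : ∀ (k : Int) (p : Bool),
    (PySem.List.enumerate (List.zip (p :: cs.map PySem.Chars.isdigit) (cs.map PySem.Chars.isdigit)) k).filterMap
      (fun q => if q.2.2 && !q.2.1 then some q.1 else none) = pvS k p cs := by
  induction cs with
  | nil => intro k p; simp [PySem.List.enumerate_nil, pvS]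
  | cons c cs ih =>
    intro k p
    simp only [List.map_cons, List.zip_cons_cons, PySem.List.enumerate_cons]
    rw [pvS]
    by_cases h : (PySem.Chars.isdigit c && !p) = true
    · rw [List.filterMap_cons_some (b := k) (by simp [h]), ih (k + 1) (PySem.Chars.isdigit c)]
      simp [h]
    · rw [List.filterMap_cons_none (by simp [Bool.eq_false_iff.mpr h]), ih (k + 1) (PySem.Chars.isdigit c)]
      simp [Bool.eq_false_iff.mpr h]
lemma ends_eq (cs : List Char) : ∀ (k : Int),
    (PySem.List.enumerate (List.zip (cs.map PySem.Chars.isdigit) ((cs.map PySem.Chars.isdigit).drop 1 ++ [false])) k).filterMap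
      (fun q => if q.2.1 && !q.2.2 then some (q.1 + 1) else none) = pvE k cs := by
  induction cs with
  | nil => intro k; simp [PySem.List.enumerate_nil, pvE]
  | cons c cs ih =>
    intro k
    match cs with
    | [] =>
      rw [pvE, pvE]
      by_cases h : PySem.Chars.isdigit c = true
      · simp [PySem.List.enumerate_cons, PySem.List.enumerate_nil, pvHeadDig, h]
      · simp [PySem.List.enumerate_cons, PySem.List.enumerate_nil, pvHeadDig,
          Bool.eq_false_iff.mpr h]
    | x :: cs' =>
      have hih := ih (k + 1)
      simp only [List.map_cons, List.drop_succ_cons, List.drop_zero] at hih ⊢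
      simp only [List.cons_append, List.zip_cons_cons, PySem.List.enumerate_cons]
      rw [pvE]
      by_cases h : (PySem.Chars.isdigit c && !PySem.Chars.isdigit x) = true
      · rw [List.filterMap_cons_some (b := k + 1) (by simp [h]), hih]
        simp [pvHeadDig, h]
      · rw [List.filterMap_cons_none (by simp [Bool.eq_false_iff.mpr h]), hih]
        simp [pvHeadDig, Bool.eq_false_iff.mpr h]
lemma stars_eq (cs : List Char) : ∀ (k : Int),
    (PySem.List.enumerate cs k).filterMap (fun p => if p.2 = '*' then some p.1 else none) =
      pvSI k cs := by
  induction cs with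
  | nil => intro k; simp [PySem.List.enumerate_nil, pvSI]
  | cons c cs ih =>
    intro k
    simp only [PySem.List.enumerate_cons]
    rw [pvSI]
    by_cases h : c = '*'
    · rw [List.filterMap_cons_some (b := k) (by simp [h]), ih (k + 1)]
      simp [h]
    · rw [List.filterMap_cons_none (by simp [h]), ih (k + 1)]
      simp [h]
lemma headDig_dropWhile (cs : List Char) :
    pvHeadDig (cs.dropWhile PySem.Chars.isdigit) = false := by
  induction cs with
  | nil => rfl
  | cons c cs ih =>
    by_cases h : PySem.Chars.isdigit c
    · simpa [List.dropWhile_cons, h] using ih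
    · simp [h, pvHeadDig]
    
lemma pvS_true_eq_false (rest : List Char) (k : Int) (h : pvHeadDig rest = false) :
    pvS k true rest = pvS k false rest := by
  cases rest with
  | nil => rfl
  | cons x r => simp [pvHeadDig] at h; simp [pvS, h]

lemma pvS_true_digits (d : List Char) (hd : ∀ x ∈ d, PySem.Chars.isdigit x = true) :
    ∀ (rest : List Char) (k : Int), pvS k true (d ++ rest) = pvS (k + d.length) true rest := by
  induction d with
  | nil => intro rest k; simp
  | cons c d ih =>
    intro rest k
    rw [List.cons_append, pvS]
    simp only [hd c (by simp)]
    rw [ih (fun x hx => hd x (by simp [hx])) rest (k + 1)]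
    simp; ring_nf

lemma pvS_digits (d : List Char) (hne : d ≠ []) (hd : ∀ x ∈ d, PySem.Chars.isdigit x = true)
    (rest : List Char) (k : Int) (h : pvHeadDig rest = false) :
    pvS k false (d ++ rest) = k :: pvS (k + d.length) false rest := by
  match d with
  | c :: d' =>
    rw [List.cons_append, pvS]
    simp only [hd c (by simp), Bool.not_false, Bool.and_true, if_pos]
    rw [pvS_true_digits d' (fun x hx => hd x (by simp [hx])) rest (k + 1),
      pvS_true_eq_false _ _ h]
    simp; ring_nf

lemma pvE_digits (d : List Char) : ∀ (_ : d ≠ []) (_ : ∀ x ∈ d, PySem.Chars.isdigit x = true)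
    (rest : List Char) (k : Int), pvHeadDig rest = false →
      pvE k (d ++ rest) = (k + d.length) :: pvE (k + d.length) rest := by
  induction d with
  | nil => intro hne; exact absurd rfl hne
  | cons c d ih =>
    intro _ hd rest k h
    rw [List.cons_append, pvE]
    cases d with
    | nil =>
      simp only [List.nil_append]
      simp [hd c (by simp), h]
    | cons y d' =>
      have hy : PySem.Chars.isdigit y = true := hd y (by simp)
      rw [if_neg (by simp [pvHeadDig, hy])]
      rw [List.nil_append,
        ih (by simp) (fun x hx => hd x (by simp [hx])) rest (k + 1) h]
      have harith : (k + 1) + ((y :: d').length : Int) = k + ((c :: y :: d').length : Int) := by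
        simp only [List.length_cons]; push_cast; ring
      rw [harith]

lemma star_ne_digit (x : Char) (h : PySem.Chars.isdigit x = true) : x ≠ '*' := by
  intro hx; subst hx; exact absurd h (by decide)

lemma pvSI_digits (d : List Char) (hd : ∀ x ∈ d, PySem.Chars.isdigit x = true) :
    ∀ (rest : List Char) (k : Int), pvSI k (d ++ rest) = pvSI (k + d.length) rest := by
  induction d with
  | nil => intro rest k; simp
  | cons c d ih =>
    intro rest k
    rw [List.cons_append, pvSI]
    simp only [if_neg (star_ne_digit c (hd c (by simp)))]
    rw [ih (fun x hx => hd x (by simp [hx])) rest (k + 1)]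
    simp; ring_nf

lemma goA_main (n : Nat) : ∀ (cs pre : List Char) (parts : List (Int × (Int × Int)))
    (star : PySem.Set Int), cs.length ≤ n →
    extract_part_star_goA cs pre.length parts star =
      (parts ++ ((pvS (pre.length : Int) false cs).zip (pvE (pre.length : Int) cs)).map
          (fun se => (((PySem.Int.ofChars? (PySem.List.slice (pre ++ cs) (some se.1) (some se.2))).getD 0),
            (se.1, se.2))),
        List.foldl PySem.Set.add star (pvSI (pre.length : Int) cs)) := by
  induction n with
  | zero =>
    intro cs pre parts star hlen
    have : cs = [] := List.length_eq_zero_iff.mp (Nat.le_zero.mp hlen)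
    subst this
    simp [extract_part_star_goA, pvS, pvE, pvSI]
  | succ n ihn =>
    intro cs pre parts star hlen
    match cs with
    | [] => simp [extract_part_star_goA, pvS, pvE, pvSI]
    | c :: rest =>
      by_cases hd : PySem.Chars.isdigit c
      · -- head starts a digit run d; A consumes it in one step, B's boundary lists
        -- produce exactly the pair (|pre|, |pre| + |d|) for it
        rw [extract_part_star_goA, if_pos hd]
        set d := (c :: rest).takeWhile PySem.Chars.isdigit with hdd
        set rest' := (c :: rest).dropWhile PySem.Chars.isdigit with hrr
        have hne : d ≠ [] := by rw [hdd]; simp [hd]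
        have hall : ∀ x ∈ d, PySem.Chars.isdigit x = true := fun x hx => by
          simpa using List.mem_takeWhile_imp hx
        have hh : pvHeadDig rest' = false := headDig_dropWhile _
        have hdecomp : c :: rest = d ++ rest' := (List.takeWhile_append_dropWhile).symm
        have hlen' : rest'.length ≤ n := by
          have he : rest' = rest.dropWhile PySem.Chars.isdigit := by
            rw [hrr]; simp [hd]
          have h2 := List.length_dropWhile_le PySem.Chars.isdigit rest
          simp only [List.length_cons] at hlen
          rw [he]; omega
        have ih' := ihn rest' (pre ++ d)
          (parts ++ [(((PySem.Int.ofChars? d).getD 0),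
            ((pre.length : Int), ((pre.length + d.length : Nat) : Int)))]) star hlen'
        simp only [List.length_append] at ih'
        rw [ih']
        conv_rhs => rw [hdecomp]
        rw [pvS_digits d hne hall rest' _ hh, pvE_digits d hne hall rest' _ hh,
          pvSI_digits d hall rest']
        simp only [List.zip_cons_cons, List.map_cons]
        rw [show (pre ++ (d ++ rest')) = ((pre ++ d) ++ rest') from by simp,
          PySem.List.slice_natCast_add (xs := (pre ++ d) ++ rest') (j := pre.length) (n := d.length)]
        push_cast
        simp [List.append_assoc]
      · rw [extract_part_star_goA, if_neg hd]
        have hdc : PySem.Chars.isdigit c = false := by simpa using hd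
        have hlen' : rest.length ≤ n := by simp only [List.length_cons] at hlen; omega
        have ih' := ihn rest (pre ++ [c]) parts
          (if c = '*' then PySem.Set.add star (pre.length : Int) else star) hlen'
        simp only [List.length_append, List.length_cons, List.length_nil] at ih'
        rw [ih']
        rw [pvS, pvE, pvSI]
        simp only [hdc]
        push_cast
        simp [List.append_assoc]
        split_ifs <;> simp [List.foldl]

theorem extract_part_star_spec : Claim_equal_extract_part_star := by
  intro line _
  unfold Spec_extract_part_star extract_part_star extract_part_star_alt
  simp only [starts_eq, ends_eq, stars_eq, PySem.Set.ofList_eq_foldl]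
  have h := goA_main line.toList.length line.toList [] [] PySem.Set.empty le_rfl
  simpa [PySem.Set.empty] using h
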